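-- pv_equiv track=rewrite | github.com/hotchilianalytics/verityngn-oss | verityngn/workflows/claim_processor.py | _analyze_speaker_authority
-- ===== SOURCE A (Python) =====
-- def _analyze_speaker_authority(speaker: str) -> int:
--     """Analyze speaker authority (generalized patterns)."""
--     score = 0
--     speaker_lower = speaker.lower()
--
--     if any(term in speaker_lower for term in ['dr.', 'doctor', 'professor', 'phd']):
--         score += 15
--     elif any(term in speaker_lower for term in ['expert', 'specialist', 'researcher']):
--         score += 12
--     elif any(term in speaker_lower for term in ['host', 'presenter', 'announcer']):
--         score += 8
--     elif any(term in speaker_lower for term in ['testimonial', 'reviewer', 'patient']):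
--         score += 5
--     else:
--         score += 3
--
--     return score
-- ===== SOURCE B (Python) =====
-- _KEYWORD_SCORES = {
--     'dr.': 15, 'doctor': 15, 'professor': 15, 'phd': 15,
--     'expert': 12, 'specialist': 12, 'researcher': 12,
--     'host': 8, 'presenter': 8, 'announcer': 8,
--     'testimonial': 5, 'reviewer': 5, 'patient': 5,
-- }
--
-- def _analyze_speaker_authority(speaker: str) -> int:
--     """Max score over all matching keywords (base 3): the scores encode the
--     priority, so no ordered cascade or short-circuit is needed."""
--     s = speaker.lower()
--     best = 3
--     for kw, sc in _KEYWORD_SCORES.items():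
--         if kw in s:
--             best = max(best, sc)
--     return best
-- ===== Notes on version B (the rewrite author's own statement) =====
-- stated objective: alternative
-- what changed: Replaces the ordered if/elif first-match cascade by max-aggregation over a flat keyword-to-score map: every keyword is tested and the best score wins, which coincides with A because the scores are strictly decreasing along A's priority order.
import Mathlib
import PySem

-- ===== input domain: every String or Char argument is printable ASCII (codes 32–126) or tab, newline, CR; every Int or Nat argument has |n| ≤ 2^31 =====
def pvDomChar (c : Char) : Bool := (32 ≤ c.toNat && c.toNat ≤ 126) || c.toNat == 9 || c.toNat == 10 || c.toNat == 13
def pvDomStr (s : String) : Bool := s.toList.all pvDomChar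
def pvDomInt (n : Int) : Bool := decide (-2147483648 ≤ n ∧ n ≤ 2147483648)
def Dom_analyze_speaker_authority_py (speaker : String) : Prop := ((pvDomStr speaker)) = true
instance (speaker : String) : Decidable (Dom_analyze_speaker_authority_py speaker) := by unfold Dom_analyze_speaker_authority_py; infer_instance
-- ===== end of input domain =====

-- B replaces A's ordered if/elif cascade by max-aggregation over a flat keyword->score map (alternative algorithm: scores encode the priority).


-- ===== PORT A =====
-- Literal port of A: lowercase once, then an if/elif cascade of `any` membership tests.
def analyze_speaker_authority_py (speaker : String) : Int :=
  let score : Int := 0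
  let speaker_lower := PySem.Str.lower speaker
  if ["dr.", "doctor", "professor", "phd"].any (fun term => PySem.Str.isIn term speaker_lower) then
    score + 15
  else if ["expert", "specialist", "researcher"].any (fun term => PySem.Str.isIn term speaker_lower) then
    score + 12
  else if ["host", "presenter", "announcer"].any (fun term => PySem.Str.isIn term speaker_lower) then
    score + 8
  else if ["testimonial", "reviewer", "patient"].any (fun term => PySem.Str.isIn term speaker_lower) then
    score + 5
  else
    score + 3

-- ===== PORT B =====
-- Port of B: flat keyword->score association map (dict in insertion order).
def pvKeywordScores : List (String × Int) :=
  [("dr.", 15), ("doctor", 15), ("professor", 15), ("phd", 15),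
   ("expert", 12), ("specialist", 12), ("researcher", 12),
   ("host", 8), ("presenter", 8), ("announcer", 8),
   ("testimonial", 5), ("reviewer", 5), ("patient", 5)]

-- Port of B's loop: best = 3; for kw, sc in items: if kw in s: best = max(best, sc)
def analyze_speaker_authority_py_alt (speaker : String) : Int :=
  let s := PySem.Str.lower speaker
  pvKeywordScores.foldl (fun best p => if PySem.Str.isIn p.1 s then max best p.2 else best) 3

-- ===== PRECONDITION & SPEC =====
def Spec_analyze_speaker_authority_py (speaker : String) (out : Int) : Prop := out = analyze_speaker_authority_py_alt speaker
instance (speaker : String) (out : Int) : Decidable (Spec_analyze_speaker_authority_py speaker out) := by unfold Spec_analyze_speaker_authority_py; infer_instance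

-- ===== CLAIM (what is proved, stated in full; the proofs are below) =====
def Claim_equal_analyze_speaker_authority_py : Prop := ∀ (speaker : String), Dom_analyze_speaker_authority_py speaker → Spec_analyze_speaker_authority_py speaker (analyze_speaker_authority_py speaker)

-- ===== LEMMAS AND PROOFS =====

-- Folding B's step over a group of keywords that all carry the same score sc
-- yields `max acc sc` iff some keyword of the group matches, else `acc`.
theorem pvFoldGroup (s : String) (kws : List String) (sc acc : Int) :
    (kws.map (fun k => (k, sc))).foldl
        (fun best p => if PySem.Str.isIn p.1 s then max best p.2 else best) acc
      = if kws.any (fun k => PySem.Str.isIn k s) then max acc sc else acc := by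
  induction kws generalizing acc with
  | nil => simp
  | cons k rest ih =>
      simp only [List.map_cons, List.foldl_cons, List.any_cons]
      by_cases h : PySem.Str.isIn k s = true
      · simp only [h, Bool.true_or]
        rw [ih]
        split_ifs <;> omega
      · rw [Bool.not_eq_true] at h
        simp only [h, Bool.false_or, Bool.false_eq_true, if_false]
        exact ih acc

-- ===== VERDICT (by name: the statement is the Claim_ definition above) =====
theorem analyze_speaker_authority_py_spec : Claim_equal_analyze_speaker_authority_py := by
  intro speaker _
  show _ = _
  unfold analyze_speaker_authority_py analyze_speaker_authority_py_alt
  have hsplit : pvKeywordScores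
      = (["dr.", "doctor", "professor", "phd"].map (fun k => (k, (15 : Int))))
        ++ (["expert", "specialist", "researcher"].map (fun k => (k, (12 : Int))))
        ++ (["host", "presenter", "announcer"].map (fun k => (k, (8 : Int))))
        ++ (["testimonial", "reviewer", "patient"].map (fun k => (k, (5 : Int)))) := by rfl
  rw [hsplit]
  simp only [List.foldl_append, pvFoldGroup, zero_add]
  split_ifs <;> omega
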